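-- pv_equiv track=rewrite | github.com/Adyanna/conecta4 | src/conecta4/list_utils.py | find_streak
-- ===== SOURCE A (Python) =====
-- def find_streak(haystack, needle, streak):
--   """
--   Encuentra un racha de
--   """
--   assert streak>0
--   contador=0
--   for item in haystack:
--     if item==needle:
--       contador+=1
--       if contador==streak:
--         break
--     else:
--       contador=0
--
--   return contador==streak
-- ===== SOURCE B (Python) =====
-- from itertools import groupby
--
-- def find_streak(haystack, needle, streak):
--   assert streak > 0
--   return any(key == needle and sum(1 for _ in grp) >= streak
--              for key, grp in groupby(haystack))
-- ===== Notes on version B (the rewrite author's own statement) =====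
-- stated objective: idiomatic
-- what changed: Replaces the manual counter-with-reset loop (and break) by itertools.groupby: group consecutive equal items into runs and test whether some run of the needle has length >= streak.
import Mathlib
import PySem

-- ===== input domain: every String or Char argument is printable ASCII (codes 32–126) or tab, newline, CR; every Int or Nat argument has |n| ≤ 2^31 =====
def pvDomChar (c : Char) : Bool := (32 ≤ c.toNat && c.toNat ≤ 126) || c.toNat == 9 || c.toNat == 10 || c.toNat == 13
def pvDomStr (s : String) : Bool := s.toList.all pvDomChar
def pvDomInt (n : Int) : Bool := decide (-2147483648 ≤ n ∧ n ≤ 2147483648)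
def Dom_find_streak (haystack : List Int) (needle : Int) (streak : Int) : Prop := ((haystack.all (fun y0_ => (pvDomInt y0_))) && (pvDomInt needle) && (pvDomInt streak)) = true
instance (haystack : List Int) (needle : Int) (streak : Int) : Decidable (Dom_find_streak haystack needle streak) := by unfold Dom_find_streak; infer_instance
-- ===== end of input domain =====

-- B replaces A's counter-with-reset loop by grouping consecutive equal items into runs
-- (itertools.groupby) and testing for a needle run of length >= streak (idiomatic rewrite).

-- ===== PORT A =====
-- the for-loop of A: counter `c`, reset on mismatch, break (returning streak's value) when c reaches streak
def findStreakLoop (needle streak : Int) : List Int → Int → Int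
  | [], c => c
  | x :: xs, c =>
    if x == needle then
      (if c + 1 == streak then c + 1 else findStreakLoop needle streak xs (c + 1))
    else findStreakLoop needle streak xs 0

def find_streak (haystack : List Int) (needle : Int) (streak : Int) : Bool :=
  findStreakLoop needle streak haystack 0 == streak

-- ===== PORT B =====
-- itertools.groupby: list of (key, run length) for maximal runs of consecutive equal items
def pyGroupby (xs : List Int) : List (Int × Nat) :=
  match xs with
  | [] => []
  | x :: rest =>
    (x, 1 + (rest.takeWhile (· == x)).length) :: pyGroupby (rest.dropWhile (· == x))
termination_by xs.length
decreasing_by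
  simp only [List.length_cons]
  exact Nat.lt_succ_of_le (List.length_dropWhile_le _ _)

def find_streak_alt (haystack : List Int) (needle : Int) (streak : Int) : Bool :=
  (pyGroupby haystack).any (fun p => p.1 == needle && decide (streak ≤ (p.2 : Int)))

-- ===== PRECONDITION & SPEC =====
-- Pre_ excludes exactly the inputs where A raises: `assert streak > 0` fails for streak ≤ 0
-- (B keeps the same assert, so it raises there too).
def Pre_find_streak (haystack : List Int) (needle : Int) (streak : Int) : Prop := 0 < streak
instance (haystack : List Int) (needle : Int) (streak : Int) : Decidable (Pre_find_streak haystack needle streak) := by unfold Pre_find_streak; infer_instance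
def pvWitness_find_streak : List Int × Int × Int := ([1, 1, 2, 1], 1, 2)

def Spec_find_streak (haystack : List Int) (needle : Int) (streak : Int) (out : Bool) : Prop := out = find_streak_alt haystack needle streak
instance (haystack : List Int) (needle : Int) (streak : Int) (out : Bool) : Decidable (Spec_find_streak haystack needle streak out) := by unfold Spec_find_streak; infer_instance

-- ===== CLAIM (what is proved, stated in full; the proofs are below) =====
def Claim_equal_find_streak : Prop := ∀ (haystack : List Int) (needle : Int) (streak : Int), Dom_find_streak haystack needle streak → Pre_find_streak haystack needle streak → Spec_find_streak haystack needle streak (find_streak haystack needle streak)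

-- ===== LEMMAS AND PROOFS =====

-- consuming a nonempty block of non-needle elements resets the counter
theorem findStreakLoop_skip (needle streak : Int) (ts ys : List Int)
    (h : ∀ t ∈ ts, t ≠ needle) (c : Int) (hne : ts ≠ []) :
    findStreakLoop needle streak (ts ++ ys) c = findStreakLoop needle streak ys 0 := by
  induction ts generalizing c with
  | nil => exact absurd rfl hne
  | cons t ts ih =>
    have ht : t ≠ needle := h t (List.mem_cons_self)
    simp only [List.cons_append, findStreakLoop, beq_iff_eq, if_neg ht]
    cases ts with
    | nil => simp
    | cons u us => exact ih (fun x hx => h x (List.mem_cons_of_mem _ hx)) 0 (by simp)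

-- consuming a block of needle elements: break (value streak) iff the counter reaches streak
theorem findStreakLoop_run (needle streak : Int) (ts ys : List Int)
    (h : ∀ t ∈ ts, t = needle) (c : Int) (hc : c < streak) :
    findStreakLoop needle streak (ts ++ ys) c =
      (if streak ≤ c + ts.length then streak else findStreakLoop needle streak ys (c + ts.length)) := by
  induction ts generalizing c with
  | nil =>
    rw [List.nil_append, List.length_nil, if_neg (by push_cast; omega)]
    norm_num
  | cons t ts ih =>
    have ht : t = needle := h t (List.mem_cons_self)
    subst ht
    rw [List.cons_append, findStreakLoop, if_pos (by simp), List.length_cons]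
    by_cases hb : (c + 1 == streak) = true
    · rw [if_pos hb, if_pos (by simp only [beq_iff_eq] at hb; push_cast; omega)]
      simpa using hb
    · rw [if_neg hb]
      simp only [beq_iff_eq] at hb
      rw [ih (fun x hx => h x (List.mem_cons_of_mem _ hx)) (c + 1) (by omega)]
      have hcast : c + 1 + (ts.length : Int) = c + ((ts.length + 1 : Nat) : Int) := by
        push_cast; ring
      rw [hcast]

theorem find_streak_eq_alt (needle streak : Int) (hs : 0 < streak) :
    ∀ (n : Nat) (xs : List Int), xs.length ≤ n →
      find_streak xs needle streak = find_streak_alt xs needle streak := by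
  intro n
  induction n with
  | zero =>
    intro xs hlen
    have : xs = [] := List.eq_nil_of_length_eq_zero (Nat.le_zero.mp hlen)
    subst this
    simp [find_streak, find_streak_alt, findStreakLoop, pyGroupby]
    omega
  | succ n ih =>
    intro xs hlen
    cases xs with
    | nil =>
      simp [find_streak, find_streak_alt, findStreakLoop, pyGroupby]
      omega
    | cons x rest =>
      set ts := rest.takeWhile (· == x) with hts
      set ys := rest.dropWhile (· == x) with hys
      have hsplit : x :: rest = (x :: ts) ++ ys := by
        simp [hts, hys, List.takeWhile_append_dropWhile]
      have hgroup : pyGroupby (x :: rest) = (x, 1 + ts.length) :: pyGroupby ys := by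
        rw [pyGroupby]
      have hylen : ys.length ≤ n := by
        have h1 : ys.length ≤ rest.length := by
          rw [hys]; exact List.length_dropWhile_le _ _
        simp only [List.length_cons] at hlen
        omega
      have hihys := ih ys hylen
      have hloop : findStreakLoop needle streak (x :: rest) 0
          = findStreakLoop needle streak ((x :: ts) ++ ys) 0 := by rw [← hsplit]
      have hmemts : ∀ t ∈ x :: ts, t = x := by
        intro t ht
        rcases List.mem_cons.mp ht with h | h
        · exact h
        · simpa using List.mem_takeWhile_imp h
      by_cases hx : x = needle
      · -- head run consists of needles
        subst hx
        have hrun := findStreakLoop_run x streak (x :: ts) ys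
          (by simpa using hmemts) 0 hs
        rw [find_streak, hloop, hrun]
        simp only [List.length_cons, zero_add]
        by_cases hge : streak ≤ ((ts.length + 1 : Nat) : Int)
        · rw [if_pos hge]
          have hle : streak ≤ 1 + (ts.length : Int) := by push_cast at hge; omega
          have halt : find_streak_alt (x :: rest) x streak = true := by
            simp [find_streak_alt, hgroup, hle]
          rw [halt]
          simp
        · rw [if_neg hge]
          have hne : ¬ streak ≤ 1 + (ts.length : Int) := by push_cast at hge; omega
          have halt : find_streak_alt (x :: rest) x streak = find_streak_alt ys x streak := by
            simp [find_streak_alt, hgroup, hne]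
          rw [halt, ← hihys, find_streak]
          -- counter after the head run is below streak; ys starts with a non-x element (or is empty)
          cases hysc : ys with
          | nil =>
            simp only [findStreakLoop]
            have l1 : (((ts.length + 1 : Nat) : Int) == streak) = false := by
              simp only [beq_eq_false_iff_ne, ne_eq]; push_cast at hge ⊢; omega
            have l2 : ((0 : Int) == streak) = false := by
              simp only [beq_eq_false_iff_ne, ne_eq]; omega
            rw [l1, l2]
          | cons y zs =>
            have hy : y ≠ x := by
              have hh := List.head?_dropWhile_not (· == x) rest
              rw [← hys, hysc] at hh
              simpa using hh
            simp only [findStreakLoop, beq_iff_eq, if_neg hy]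
      · -- head run consists of non-needles
        have hskip := findStreakLoop_skip needle streak (x :: ts) ys
          (by intro t ht; rw [hmemts t ht]; exact hx) 0 (by simp)
        rw [find_streak, hloop, hskip]
        have halt : find_streak_alt (x :: rest) needle streak = find_streak_alt ys needle streak := by
          rw [find_streak_alt, hgroup]
          simp only [List.any_cons, find_streak_alt]
          have hxb : (x == needle) = false := by simpa using hx
          simp [hxb]
        rw [halt, ← hihys, find_streak]

-- ===== VERDICT (by name: the statement is the Claim_ definition above) =====
theorem find_streak_spec : Claim_equal_find_streak := by
  intro haystack needle streak _ hpre
  unfold Spec_find_streak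
  exact find_streak_eq_alt needle streak hpre haystack.length haystack (le_refl _)
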